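-- pv_equiv track=rewrite | github.com/Boot-Camp-Coding-Test/Programmers | day4/problem5/[김유민]모의고사.py | solution
-- ===== SOURCE A (Python) =====
-- def compare(a, b):
--     if a==b :
--         return 1
--     else :
--         return 0
--
-- def solution(answers):
--     num_correct = [0]*3
--     options_1 = [1, 2, 3, 4, 5]
--     options_2 = [1, 3, 4, 5]
--     options_3 = [3, 1, 2, 4, 5]
--
--     # ans_1 = [options[i%5] if (i%5 != 0) else 5 for i in range(1, len(answers)+1)]
--     ans_1 = [options_1[i%5] for i in range(len(answers))]
--     ans_2 = [options_2[int(i/2)%4] if (i%2 != 0) else 2 for i in range(len(answers))]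
--     ans_3 = [options_3[int(i/2)%5] for i in range(len(answers))]
--
--     for i in range(len(answers)) :
--         num_correct[0] += compare(ans_1[i], answers[i])
--         num_correct[1] += compare(ans_2[i], answers[i])
--         num_correct[2] += compare(ans_3[i], answers[i])
--
--     result = []
--     max_correct = max(num_correct)
--     for i in range(len(num_correct)) :
--         if num_correct[i] == max_correct :
--             result.append(i+1)
--
--     return result
-- ===== SOURCE B (Python) =====
-- def solution(answers):
--     # Bucket the answer sheet once by (position mod 40, answer value); 40 = lcm of the
--     # three pattern cycle lengths (5, 8, 10), so within a bucket every pattern predicts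
--     # the same value.  Each pattern's score is then read off the histogram with 40 lookups.
--     CYCLE = 40
--     hist = {}
--     for i, a in enumerate(answers):
--         key = (i % CYCLE, a)
--         hist[key] = hist.get(key, 0) + 1
--     patterns = [[1, 2, 3, 4, 5],
--                 [2, 1, 2, 3, 2, 4, 2, 5],
--                 [3, 3, 1, 1, 2, 2, 4, 4, 5, 5]]
--     scores = []
--     for p in patterns:
--         s = 0
--         for r in range(CYCLE):
--             s += hist.get((r, p[r % len(p)]), 0)
--         scores.append(s)
--     m = max(scores)
--     return [k + 1 for k, s in enumerate(scores) if s == m]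
-- ===== Notes on version B (the rewrite author's own statement) =====
-- stated objective: alternative
-- what changed: B replaces A's three precomputed prediction lists and per-index triple tally by a pattern-independent histogram keyed by (index mod 40, answer) -- 40 = lcm of the three cycle lengths -- from which each pattern's score is read off with 40 dictionary lookups; the result list is built by filtering enumerate(scores).
import Mathlib
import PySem

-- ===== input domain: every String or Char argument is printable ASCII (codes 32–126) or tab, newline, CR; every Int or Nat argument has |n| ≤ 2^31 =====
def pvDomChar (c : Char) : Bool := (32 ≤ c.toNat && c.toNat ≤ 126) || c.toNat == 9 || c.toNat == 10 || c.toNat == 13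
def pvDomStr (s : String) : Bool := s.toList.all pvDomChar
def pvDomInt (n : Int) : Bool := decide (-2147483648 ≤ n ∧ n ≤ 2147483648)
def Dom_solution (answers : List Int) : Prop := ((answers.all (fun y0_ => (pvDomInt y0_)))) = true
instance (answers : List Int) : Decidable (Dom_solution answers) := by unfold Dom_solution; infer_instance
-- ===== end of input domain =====

-- B buckets the answers once into a histogram keyed by (index mod 40, answer) — 40 = lcm of the
-- three pattern cycle lengths — and reads each pattern's score off it with 40 lookups (objective: alternative).

-- ===== PORT A =====
-- compare(a, b)
def pvCompare (a b : Int) : Int := if a = b then 1 else 0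

-- Literal port of A. All list indices A uses are in range, so xs[e] is ported as
-- pyGetD (Python raises only out of range, which never happens here); int(i/2) on the
-- nonnegative i of range(len(answers)) is ported as truncdiv (= int(a/b), exact).
def solution (answers : List Int) : List Int :=
  let n : Int := (answers.length : Int)
  let options1 : List Int := [1, 2, 3, 4, 5]
  let options2 : List Int := [1, 3, 4, 5]
  let options3 : List Int := [3, 1, 2, 4, 5]
  let ans1 := (PySem.List.pyRange 0 n 1).map (fun i => PySem.List.pyGetD options1 (PySem.Int.mod i 5) 0)
  let ans2 := (PySem.List.pyRange 0 n 1).map (fun i =>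
      if PySem.Int.mod i 2 ≠ 0 then PySem.List.pyGetD options2 (PySem.Int.mod (PySem.Int.truncdiv i 2) 4) 0 else 2)
  let ans3 := (PySem.List.pyRange 0 n 1).map (fun i => PySem.List.pyGetD options3 (PySem.Int.mod (PySem.Int.truncdiv i 2) 5) 0)
  let nc := (PySem.List.pyRange 0 n 1).foldl (fun (c : Int × Int × Int) i =>
      (c.1 + pvCompare (PySem.List.pyGetD ans1 i 0) (PySem.List.pyGetD answers i 0),
       c.2.1 + pvCompare (PySem.List.pyGetD ans2 i 0) (PySem.List.pyGetD answers i 0),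
       c.2.2 + pvCompare (PySem.List.pyGetD ans3 i 0) (PySem.List.pyGetD answers i 0))) (0, 0, 0)
  let ncList : List Int := [nc.1, nc.2.1, nc.2.2]
  let maxCorrect := (PySem.List.max? ncList id).getD 0
  (PySem.List.pyRange 0 3 1).foldl (fun r i =>
      if PySem.List.pyGetD ncList i 0 = maxCorrect then r ++ [i + 1] else r) []

-- ===== PORT B =====
-- Literal port of Source B: one histogram pass keyed by (i % 40, answer), then each pattern's
-- score as a sum of 40 dict lookups, then filter enumerate(scores) at the max.
def solution_alt (answers : List Int) : List Int :=
  let hist := (PySem.List.enumerate answers 0).foldl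
      (fun (d : PySem.Dict (Int × Int) Int) ia =>
        d.insert (PySem.Int.mod ia.1 40, ia.2) (d.getD (PySem.Int.mod ia.1 40, ia.2) 0 + 1))
      PySem.Dict.empty
  let patterns : List (List Int) :=
      [[1, 2, 3, 4, 5], [2, 1, 2, 3, 2, 4, 2, 5], [3, 3, 1, 1, 2, 2, 4, 4, 5, 5]]
  let scores := patterns.map (fun p =>
      (PySem.List.pyRange 0 40 1).foldl (fun s r =>
        s + hist.getD (r, PySem.List.pyGetD p (PySem.Int.mod r (PySem.List.len p)) 0) 0) 0)
  let m := (PySem.List.max? scores id).getD 0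
  ((PySem.List.enumerate scores 0).filter (fun ks => ks.2 == m)).map (fun ks => ks.1 + 1)

-- ===== PRECONDITION & SPEC =====
def Spec_solution (answers : List Int) (out : List Int) : Prop := out = solution_alt answers
instance (answers : List Int) (out : List Int) : Decidable (Spec_solution answers out) := by unfold Spec_solution; infer_instance

-- ===== CLAIM (what is proved, stated in full; the proofs are below) =====
def Claim_equal_solution : Prop := ∀ (answers : List Int), Dom_solution answers → Spec_solution answers (solution answers)

-- ===== LEMMAS AND PROOFS =====

-- A's prediction for student 2 at index i equals the full cycle [2,1,2,3,2,4,2,5] at i % 8 (i ≥ 0).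
lemma pat2_eq (i : Int) (hi : 0 ≤ i) :
    (if PySem.Int.mod i 2 ≠ 0 then
        PySem.List.pyGetD ([1, 3, 4, 5] : List Int) (PySem.Int.mod (PySem.Int.truncdiv i 2) 4) 0 else (2 : Int))
    = PySem.List.pyGetD ([2, 1, 2, 3, 2, 4, 2, 5] : List Int) (PySem.Int.mod i 8) 0 := by
  lift i to Nat using hi with k
  have ht : PySem.Int.truncdiv (k : Int) 2 = ((k / 2 : Nat) : Int) := rfl
  have h2 : PySem.Int.mod (k : Int) 2 = ((k % 2 : Nat) : Int) := by
    exact_mod_cast PySem.Int.mod_natCast k 2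
  have h8 : PySem.Int.mod (k : Int) 8 = ((k % 8 : Nat) : Int) := by
    exact_mod_cast PySem.Int.mod_natCast k 8
  have h4 : PySem.Int.mod ((k / 2 : Nat) : Int) 4 = (((k / 2) % 4 : Nat) : Int) := by
    exact_mod_cast PySem.Int.mod_natCast (k / 2) 4
  rw [h2, h8, ht, h4]
  have e1 : k % 2 = k % 8 % 2 := by omega
  have e2 : k / 2 % 4 = k % 8 / 2 := by omega
  rw [e1, e2]
  have hb : k % 8 < 8 := by omega
  interval_cases h : k % 8 <;> decide

-- A's prediction for student 3 at index i equals the full cycle [3,3,1,1,2,2,4,4,5,5] at i % 10 (i ≥ 0).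
lemma pat3_eq (i : Int) (hi : 0 ≤ i) :
    PySem.List.pyGetD ([3, 1, 2, 4, 5] : List Int) (PySem.Int.mod (PySem.Int.truncdiv i 2) 5) 0
    = PySem.List.pyGetD ([3, 3, 1, 1, 2, 2, 4, 4, 5, 5] : List Int) (PySem.Int.mod i 10) 0 := by
  lift i to Nat using hi with k
  have ht : PySem.Int.truncdiv (k : Int) 2 = ((k / 2 : Nat) : Int) := rfl
  have h10 : PySem.Int.mod (k : Int) 10 = ((k % 10 : Nat) : Int) := by
    exact_mod_cast PySem.Int.mod_natCast k 10
  have h5 : PySem.Int.mod ((k / 2 : Nat) : Int) 5 = (((k / 2) % 5 : Nat) : Int) := by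
    exact_mod_cast PySem.Int.mod_natCast (k / 2) 5
  rw [h10, ht, h5]
  have e2 : k / 2 % 5 = k % 10 / 2 := by omega
  rw [e2]
  have hb : k % 10 < 10 := by omega
  interval_cases h : k % 10 <;> decide

-- An index loop 'for i in range(s, s+len): f(i, h i)' where h reads xs equals the enumerate loop.
lemma foldl_pyRange_eq_enumerate {γ : Type} (f : γ → Int → Int → γ) :
    ∀ (xs : List Int) (s : Int) (c : γ) (h : Int → Int),
      (∀ (k : Nat), (hk : k < xs.length) → h (s + k) = xs[k]) →
      (PySem.List.pyRange s (s + xs.length) 1).foldl (fun c i => f c i (h i)) c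
        = (PySem.List.enumerate xs s).foldl (fun c p => f c p.1 p.2) c := by
  intro xs
  induction xs with
  | nil => intro s c h _; simp [PySem.List.enumerate]
  | cons x rest ih =>
    intro s c h hh
    have hlt : s < s + ((x :: rest).length : Int) := by
      have : (0 : Int) < ((x :: rest).length : Int) := by exact_mod_cast Nat.succ_pos rest.length
      omega
    rw [PySem.List.pyRange_one_cons hlt, PySem.List.enumerate_cons]
    simp only [List.foldl_cons]
    have h0 : h s = x := by
      have := hh 0 (by simp)
      simpa using this
    rw [h0]
    have harg : s + ((x :: rest).length : Int) = (s + 1) + (rest.length : Int) := by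
      push_cast [List.length_cons]; ring
    rw [harg]
    exact ih (s + 1) _ h (fun k hk => by
      have := hh (k + 1) (by simpa using Nat.succ_lt_succ hk)
      simpa [add_assoc, add_comm, add_left_comm] using this)

-- A's tallying loop equals a single enumerate fold against the three full cycles.
lemma counts_eq (answers : List Int) :
    (PySem.List.pyRange 0 (answers.length : Int) 1).foldl (fun (c : Int × Int × Int) i =>
      (c.1 + pvCompare (PySem.List.pyGetD ((PySem.List.pyRange 0 (answers.length : Int) 1).map
          (fun i => PySem.List.pyGetD [1, 2, 3, 4, 5] (PySem.Int.mod i 5) 0)) i 0)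
          (PySem.List.pyGetD answers i 0),
       c.2.1 + pvCompare (PySem.List.pyGetD ((PySem.List.pyRange 0 (answers.length : Int) 1).map
          (fun i => if PySem.Int.mod i 2 ≠ 0 then
              PySem.List.pyGetD [1, 3, 4, 5] (PySem.Int.mod (PySem.Int.truncdiv i 2) 4) 0
            else 2)) i 0)
          (PySem.List.pyGetD answers i 0),
       c.2.2 + pvCompare (PySem.List.pyGetD ((PySem.List.pyRange 0 (answers.length : Int) 1).map
          (fun i => PySem.List.pyGetD [3, 1, 2, 4, 5] (PySem.Int.mod (PySem.Int.truncdiv i 2) 5) 0)) i 0)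
          (PySem.List.pyGetD answers i 0))) (0, 0, 0)
    = (PySem.List.enumerate answers 0).foldl (fun (c : Int × Int × Int) ia =>
      (c.1 + (if ia.2 = PySem.List.pyGetD [1, 2, 3, 4, 5] (PySem.Int.mod ia.1 5) 0 then 1 else 0),
       c.2.1 + (if ia.2 = PySem.List.pyGetD [2, 1, 2, 3, 2, 4, 2, 5] (PySem.Int.mod ia.1 8) 0 then 1 else 0),
       c.2.2 + (if ia.2 = PySem.List.pyGetD [3, 3, 1, 1, 2, 2, 4, 4, 5, 5] (PySem.Int.mod ia.1 10) 0 then 1 else 0))) (0, 0, 0) := by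
  have hstep : ∀ (acc : Int × Int × Int), ∀ i ∈ PySem.List.pyRange 0 (answers.length : Int) 1,
      (acc.1 + pvCompare (PySem.List.pyGetD ((PySem.List.pyRange 0 (answers.length : Int) 1).map
          (fun i => PySem.List.pyGetD [1, 2, 3, 4, 5] (PySem.Int.mod i 5) 0)) i 0)
          (PySem.List.pyGetD answers i 0),
       acc.2.1 + pvCompare (PySem.List.pyGetD ((PySem.List.pyRange 0 (answers.length : Int) 1).map
          (fun i => if PySem.Int.mod i 2 ≠ 0 then
              PySem.List.pyGetD [1, 3, 4, 5] (PySem.Int.mod (PySem.Int.truncdiv i 2) 4) 0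
            else 2)) i 0)
          (PySem.List.pyGetD answers i 0),
       acc.2.2 + pvCompare (PySem.List.pyGetD ((PySem.List.pyRange 0 (answers.length : Int) 1).map
          (fun i => PySem.List.pyGetD [3, 1, 2, 4, 5] (PySem.Int.mod (PySem.Int.truncdiv i 2) 5) 0)) i 0)
          (PySem.List.pyGetD answers i 0))
      = ((fun (c : Int × Int × Int) i a =>
      (c.1 + (if a = PySem.List.pyGetD [1, 2, 3, 4, 5] (PySem.Int.mod i 5) 0 then 1 else 0),
       c.2.1 + (if a = PySem.List.pyGetD [2, 1, 2, 3, 2, 4, 2, 5] (PySem.Int.mod i 8) 0 then 1 else 0),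
       c.2.2 + (if a = PySem.List.pyGetD [3, 3, 1, 1, 2, 2, 4, 4, 5, 5] (PySem.Int.mod i 10) 0 then 1 else 0)))
         acc i (PySem.List.pyGetD answers i 0) : Int × Int × Int) := by
    intro acc i hi
    obtain ⟨h0, hlen⟩ := PySem.List.mem_pyRange_one.mp hi
    obtain ⟨k, rfl⟩ := Int.eq_ofNat_of_zero_le h0
    have hk : k < answers.length := by exact_mod_cast hlen
    rw [PySem.List.pyGetD_map_pyRange _ _ _ _ hk, PySem.List.pyGetD_map_pyRange _ _ _ _ hk,
        PySem.List.pyGetD_map_pyRange _ _ _ _ hk]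
    rw [pat2_eq (k : Int) (by positivity), pat3_eq (k : Int) (by positivity)]
    simp only [pvCompare]
    refine Prod.ext ?_ (Prod.ext ?_ ?_) <;> simp [eq_comm]
  rw [PySem.List.foldl_congr_mem _ _ _ _ hstep]
  have h2 := foldl_pyRange_eq_enumerate
      (fun (c : Int × Int × Int) i a =>
      (c.1 + (if a = PySem.List.pyGetD [1, 2, 3, 4, 5] (PySem.Int.mod i 5) 0 then 1 else 0),
       c.2.1 + (if a = PySem.List.pyGetD [2, 1, 2, 3, 2, 4, 2, 5] (PySem.Int.mod i 8) 0 then 1 else 0),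
       c.2.2 + (if a = PySem.List.pyGetD [3, 3, 1, 1, 2, 2, 4, 4, 5, 5] (PySem.Int.mod i 10) 0 then 1 else 0)))
      answers 0 (0, 0, 0) (fun i => PySem.List.pyGetD answers i 0)
      (fun k hk => by
        rw [zero_add]
        exact PySem.List.pyGetD_eq_getElem answers 0 (by positivity) (by exact_mod_cast hk))
  simpa using h2

-- The triple tally over a pair list is the triple of countP's.
lemma foldl_triple (P1 P2 P3 : Int × Int → Prop) [DecidablePred P1] [DecidablePred P2]
    [DecidablePred P3] :
    ∀ (l : List (Int × Int)) (c : Int × Int × Int),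
      l.foldl (fun (c : Int × Int × Int) ia =>
        (c.1 + (if P1 ia then 1 else 0),
         c.2.1 + (if P2 ia then 1 else 0),
         c.2.2 + (if P3 ia then 1 else 0))) c
      = (c.1 + (l.countP (fun ia => decide (P1 ia)) : Int),
         c.2.1 + (l.countP (fun ia => decide (P2 ia)) : Int),
         c.2.2 + (l.countP (fun ia => decide (P3 ia)) : Int)) := by
  intro l
  induction l with
  | nil => intro c; simp
  | cons x t ih =>
    intro c
    rw [List.foldl_cons, ih]
    simp only [List.countP_cons, decide_eq_true_eq]
    refine Prod.ext ?_ (Prod.ext ?_ ?_) <;> by_cases h1 : P1 x <;>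
      by_cases h2 : P2 x <;> by_cases h3 : P3 x <;>
      simp [h1, h2, h3] <;> try ring

-- Histogram lookup = multiplicity of the key among the bucketed pairs.
lemma hist_getD (l : List (Int × Int)) (v : Int × Int) :
    ((l.foldl (fun (d : PySem.Dict (Int × Int) Int) ia =>
        d.insert (PySem.Int.mod ia.1 40, ia.2) (d.getD (PySem.Int.mod ia.1 40, ia.2) 0 + 1))
      PySem.Dict.empty).getD v 0)
    = ((l.map (fun ia => (PySem.Int.mod ia.1 40, ia.2))).count v : Int) := by
  have aux : ∀ (l : List (Int × Int)) (d : PySem.Dict (Int × Int) Int),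
      ((l.foldl (fun (d : PySem.Dict (Int × Int) Int) ia =>
          d.insert (PySem.Int.mod ia.1 40, ia.2) (d.getD (PySem.Int.mod ia.1 40, ia.2) 0 + 1)) d).getD v 0)
      = d.getD v 0 + ((l.map (fun ia => (PySem.Int.mod ia.1 40, ia.2))).count v : Int) := by
    intro l
    induction l with
    | nil => intro d; simp
    | cons x t ih =>
      intro d
      rw [List.foldl_cons, ih, List.map_cons, List.count_cons, PySem.Dict.getD_insert]
      simp only [beq_iff_eq]
      by_cases hv : v = (PySem.Int.mod x.1 40, x.2)
      · rw [if_pos hv, if_pos hv.symm, hv]; push_cast; ring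
      · rw [if_neg hv, if_neg (fun h => hv h.symm)]; push_cast; ring
  rw [aux, PySem.Dict.getD_empty, zero_add]

-- ∑ over a list of the indicator of one key = (hit or not) × multiplicity of the first component.
lemma ind_sum_list (m a2 : Int) (g : Int → Int) :
    ∀ (l : List Int),
      (l.map (fun r => if ((m, a2) == (r, g r)) then (1 : Int) else 0)).sum
      = (if (a2 == g m) then (1 : Int) else 0) * (l.count m : Int) := by
  intro l
  induction l with
  | nil => simp
  | cons r t ih =>
    rw [List.map_cons, List.sum_cons, ih, List.count_cons]
    by_cases hr : r = m
    · subst hr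
      by_cases ha : a2 = g r <;> simp [ha, Prod.ext_iff] <;> try ring
    · have : ((m, a2) == (r, g r)) = false := by
        simp [Prod.ext_iff]
        intro h; exact absurd h.symm hr
      simp [this, hr]

lemma count_pyRange40 (k : Nat) (hk : k < 40) :
    (PySem.List.pyRange 0 40 1).count ((k : Nat) : Int) = 1 := by
  interval_cases k <;> decide

-- The 40 histogram lookups for cycle-lookup g sum to the number of matching pairs.
lemma sum_count (g : Int → Int) :
    ∀ (l : List (Int × Int)), (∀ x ∈ l, 0 ≤ x.1) →
      ((PySem.List.pyRange 0 40 1).map (fun r =>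
        (((l.map (fun ia => (PySem.Int.mod ia.1 40, ia.2))).count (r, g r)) : Int))).sum
      = (l.countP (fun ia => g (PySem.Int.mod ia.1 40) == ia.2) : Int) := by
  intro l
  induction l with
  | nil => simp
  | cons x t ih =>
    intro hpos
    have hx : (0 : Int) ≤ x.1 := hpos x (by simp)
    simp only [List.map_cons, List.count_cons, Nat.cast_add, List.countP_cons]
    have hsplit := PySem.List.sum_map_add_int (PySem.List.pyRange 0 40 1)
        (fun r => (((t.map (fun ia => (PySem.Int.mod ia.1 40, ia.2))).count (r, g r)) : Int))
        (fun r => ((if ((PySem.Int.mod x.1 40, x.2) == (r, g r)) then 1 else 0 : Nat) : Int))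
    rw [hsplit, ih (fun y hy => hpos y (by simp [hy]))]
    have hcast : (fun r => ((if ((PySem.Int.mod x.1 40, x.2) == (r, g r)) then 1 else 0 : Nat) : Int))
        = (fun r => (if ((PySem.Int.mod x.1 40, x.2) == (r, g r)) then (1 : Int) else 0)) := by
      funext r; split <;> simp
    rw [hcast, ind_sum_list]
    obtain ⟨k, hk⟩ := Int.eq_ofNat_of_zero_le hx
    rw [hk]
    have hmod : PySem.Int.mod ((k : Nat) : Int) 40 = (((k % 40 : Nat)) : Int) := by
      exact_mod_cast PySem.Int.mod_natCast k 40
    rw [hk] at *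
    rw [hmod, count_pyRange40 (k % 40) (by omega)]
    have hsymm : (x.2 == g ((k % 40 : Nat) : Int)) = (g ((k % 40 : Nat) : Int) == x.2) :=
      decide_eq_decide.mpr eq_comm
    rw [hsymm]
    push_cast
    ring

-- Indices produced by enumerate from 0 are nonnegative.
lemma enum_fst_nonneg (xs : List Int) (x : Int × Int) (hx : x ∈ PySem.List.enumerate xs 0) :
    0 ≤ x.1 := by
  rw [PySem.List.enumerate_eq_map_pyRange xs 0] at hx
  obtain ⟨j, hj, rfl⟩ := List.mem_map.mp hx
  exact (PySem.List.mem_pyRange_one.mp hj).1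

-- A whole score of B: 40 histogram lookups for cycle p equal the count of matches of p's cycle.
lemma score_eq (p : List Int) (answers : List Int) :
    (PySem.List.pyRange 0 40 1).foldl (fun s r =>
      s + (((PySem.List.enumerate answers 0).foldl
        (fun (d : PySem.Dict (Int × Int) Int) ia =>
          d.insert (PySem.Int.mod ia.1 40, ia.2) (d.getD (PySem.Int.mod ia.1 40, ia.2) 0 + 1))
        PySem.Dict.empty).getD (r, PySem.List.pyGetD p (PySem.Int.mod r (PySem.List.len p)) 0) 0)) 0
    = ((PySem.List.enumerate answers 0).countP
        (fun ia => PySem.List.pyGetD p (PySem.Int.mod (PySem.Int.mod ia.1 40) (PySem.List.len p)) 0 == ia.2) : Int) := by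
  simp only [hist_getD]
  rw [PySem.List.foldl_add]
  rw [sum_count (fun r => PySem.List.pyGetD p (PySem.Int.mod r (PySem.List.len p)) 0)
        (PySem.List.enumerate answers 0) (enum_fst_nonneg answers)]
  simp

-- Reducing the bucket residue (mod 40) before a cycle of length L ∣ 40 changes nothing.
lemma countP_fix (answers : List Int) (p : List Int) (L : Nat) (hL : L ∣ 40)
    (hlen : PySem.List.len p = (L : Int)) :
    (PySem.List.enumerate answers 0).countP
        (fun ia => PySem.List.pyGetD p (PySem.Int.mod (PySem.Int.mod ia.1 40) (PySem.List.len p)) 0 == ia.2)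
    = (PySem.List.enumerate answers 0).countP
        (fun ia => decide (ia.2 = PySem.List.pyGetD p (PySem.Int.mod ia.1 (L : Int)) 0)) := by
  apply List.countP_congr
  intro x hx
  have hx0 := enum_fst_nonneg answers x hx
  obtain ⟨k, hk⟩ := Int.eq_ofNat_of_zero_le hx0
  rw [hlen, hk]
  have h40 : PySem.Int.mod ((k : Nat) : Int) 40 = (((k % 40 : Nat)) : Int) := by
    exact_mod_cast PySem.Int.mod_natCast k 40
  have hLmod : PySem.Int.mod (((k % 40 : Nat)) : Int) (L : Int) = (((k % 40 % L : Nat)) : Int) := by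
    exact_mod_cast PySem.Int.mod_natCast (k % 40) L
  have hkL : PySem.Int.mod ((k : Nat) : Int) (L : Int) = (((k % L : Nat)) : Int) := by
    exact_mod_cast PySem.Int.mod_natCast k L
  rw [h40, hLmod, hkL, Nat.mod_mod_of_dvd k hL]
  simp only [beq_iff_eq, decide_eq_true_eq]
  exact eq_comm

-- The two result-building tails agree for the same triple of counts.
lemma tail_eq (c1 c2 c3 : Int) :
    (PySem.List.pyRange 0 3 1).foldl (fun r i =>
        if PySem.List.pyGetD [c1, c2, c3] i 0 = (PySem.List.max? [c1, c2, c3] id).getD 0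
        then r ++ [i + 1] else r) ([] : List Int)
    = ((PySem.List.enumerate [c1, c2, c3] 0).filter
        (fun ks => ks.2 == (PySem.List.max? [c1, c2, c3] id).getD 0)).map (fun ks => ks.1 + 1) := by
  have h3 : PySem.List.pyRange 0 3 1 = [0, 1, 2] := by decide
  have he : PySem.List.enumerate [c1, c2, c3] 0 = [(0, c1), (1, c2), (2, c3)] := by
    rw [PySem.List.enumerate_cons, PySem.List.enumerate_cons, PySem.List.enumerate_cons]
    norm_num
  rw [h3, he]
  set m := (PySem.List.max? [c1, c2, c3] id).getD 0 with hm
  by_cases e1 : c1 = m <;> by_cases e2 : c2 = m <;> by_cases e3 : c3 = m <;>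
    simp [e1, e2, e3, PySem.List.pyGetD]

-- ===== VERDICT (by name: the statement is the Claim_ definition above) =====
theorem solution_spec : Claim_equal_solution := by
  intro answers _
  unfold Spec_solution solution solution_alt
  simp only []
  rw [counts_eq, foldl_triple]
  simp only [List.map_cons, List.map_nil]
  rw [score_eq, score_eq, score_eq,
      countP_fix answers _ 5 (by norm_num) (by decide),
      countP_fix answers _ 8 (by norm_num) (by decide),
      countP_fix answers _ 10 (by norm_num) (by decide)]
  push_cast
  simp only [zero_add]
  exact tail_eq _ _ _
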